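-- pv_equiv track=rewrite | github.com/DaRL-LibSignal/SynTraC | Train_RL_Model/utils/transform_backup.py | phase2act
-- ===== SOURCE A (Python) =====
-- def phase2act(phases):
-- 	acts = []
-- 	start = 0
-- 	for i in phases[::-1]:
-- 		if i == 0:
-- 			acts.append(start)
-- 		else:
-- 			start = i
-- 			acts.append(start)
-- 	acts.reverse()
-- 	return acts
-- ===== SOURCE B (Python) =====
-- def phase2act(phases):
--     acts = []
--     zeros = 0
--     for x in phases:
--         if x == 0:
--             zeros += 1
--         else:
--             acts.extend([x] * (zeros + 1))
--             zeros = 0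
--     acts.extend([0] * zeros)
--     return acts
-- ===== Notes on version B (the rewrite author's own statement) =====
-- stated objective: alternative
-- what changed: Replaces A's reverse/back-fill-with-carried-start/reverse with a single forward pass that counts a run of zeros and flushes it with the next nonzero (trailing zeros flushed as 0), with no list reversal.
import Mathlib
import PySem

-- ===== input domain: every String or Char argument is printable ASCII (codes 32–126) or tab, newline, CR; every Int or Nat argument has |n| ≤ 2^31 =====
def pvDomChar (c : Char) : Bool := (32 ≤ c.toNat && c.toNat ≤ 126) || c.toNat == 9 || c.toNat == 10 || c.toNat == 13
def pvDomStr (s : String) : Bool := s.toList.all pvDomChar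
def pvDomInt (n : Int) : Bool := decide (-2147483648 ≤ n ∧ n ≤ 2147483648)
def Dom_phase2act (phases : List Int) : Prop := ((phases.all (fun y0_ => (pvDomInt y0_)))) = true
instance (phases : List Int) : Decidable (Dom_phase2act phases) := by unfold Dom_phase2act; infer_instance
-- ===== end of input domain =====

-- ===== PORT A =====
-- A: iterate over phases[::-1] carrying `start` (last nonzero seen), append per element, then reverse.
def phase2act (phases : List Int) : List Int :=
  let st := ((PySem.List.slice? phases none none (-1)).getD []).foldl
    (fun (s : List Int × Int) i =>
      if i = 0 then (s.1 ++ [s.2], s.2) else (s.1 ++ [i], i))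
    ([], 0)
  st.1.reverse

-- ===== PORT B =====
-- B: forward pass counting a run of zeros, flushed with the next nonzero; trailing zeros flushed as 0.
def phase2act_alt (phases : List Int) : List Int :=
  let st := phases.foldl
    (fun (s : Nat × List Int) x =>
      if x = 0 then (s.1 + 1, s.2) else (0, s.2 ++ List.replicate (s.1 + 1) x))
    (0, [])
  st.2 ++ List.replicate st.1 0

-- ===== PRECONDITION & SPEC =====
def Spec_phase2act (phases : List Int) (out : List Int) : Prop := out = phase2act_alt phases
instance (phases : List Int) (out : List Int) : Decidable (Spec_phase2act phases out) := by unfold Spec_phase2act; infer_instance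

-- ===== CLAIM (what is proved, stated in full; the proofs are below) =====
def Claim_equal_phase2act : Prop := ∀ (phases : List Int), Dom_phase2act phases → Spec_phase2act phases (phase2act phases)

-- ===== LEMMAS AND PROOFS =====

-- reference: backward fill with default d, each zero takes the (filled) head of the rest
def gfill' (d : Int) : List Int → List Int
  | [] => []
  | x :: xs => (if x = 0 then (gfill' d xs).headD d else x) :: gfill' d xs

def gfill (xs : List Int) : List Int := gfill' 0 xs

theorem slice_rev (xs : List Int) :
    (PySem.List.slice? xs none none (-1)).getD [] = xs.reverse := by
  simp [PySem.List.slice?_none_none_neg_one]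

theorem fillA (xs : List Int) (acc : List Int) (s : Int) :
    xs.reverse.foldl
      (fun (st : List Int × Int) i =>
        if i = 0 then (st.1 ++ [st.2], st.2) else (st.1 ++ [i], i))
      (acc, s)
    = (acc ++ ((gfill' s xs).reverse), (gfill' s xs).headD s) := by
  induction xs generalizing acc s with
  | nil => simp [gfill']
  | cons x xs ih =>
    simp only [List.reverse_cons, List.foldl_append, ih, List.foldl_cons, List.foldl_nil]
    by_cases hx : x = 0 <;> simp [gfill', hx]

theorem fillB (xs : List Int) (z : Nat) (res : List Int) :
    (let st := xs.foldl
        (fun (s : Nat × List Int) x =>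
          if x = 0 then (s.1 + 1, s.2) else (0, s.2 ++ List.replicate (s.1 + 1) x))
        (z, res) ;
      st.2 ++ List.replicate st.1 0)
    = res ++ List.replicate z ((gfill xs).headD 0) ++ gfill xs := by
  induction xs generalizing z res with
  | nil => simp [gfill, gfill']
  | cons x xs ih =>
    by_cases hx : x = 0
    · simp only [List.foldl_cons, hx, ih, gfill, gfill']
      simp [List.replicate_succ' (n := z), List.append_assoc]
    · simp only [List.foldl_cons, if_neg hx, ih, gfill, gfill']
      simp [List.replicate_succ' (n := z), List.append_assoc]

-- ===== VERDICT (by name: the statement is the Claim_ definition above) =====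
theorem phase2act_spec : Claim_equal_phase2act := by
  intro phases _
  show phase2act phases = phase2act_alt phases
  simp only [phase2act, phase2act_alt, slice_rev, fillA, fillB (z := 0) (res := [])]
  simp [gfill]
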